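-- pv_equiv track=rewrite | github.com/BJCul/Pantasa | tests/hybrid_text.py | expand_pattern
-- ===== SOURCE A (Python) =====
-- def expand_pattern(pattern, pos_dict):
--     tokens = pattern.split()
--     expanded_patterns = [""]
--
--     for token in tokens:
--         if ".*" in token:  # Wildcard POS tag
--             possible_tags = pos_dict.get(token, [])
--             expanded_patterns = [f"{p} {tag}" for p in expanded_patterns for tag in possible_tags]
--         else:  # Exact token or detailed POS tag
--             expanded_patterns = [f"{p} {token}" for p in expanded_patterns]
--     return [p.strip() for p in expanded_patterns]
-- ===== SOURCE B (Python) =====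
-- def expand_pattern(pattern, pos_dict):
--     def combos(tokens):
--         if not tokens:
--             return [[]]
--         head, rest = tokens[0], tokens[1:]
--         options = pos_dict.get(head, []) if ".*" in head else [head]
--         tails = combos(rest)
--         return [[opt] + tail for opt in options for tail in tails]
--     return [" ".join(c).strip() for c in combos(pattern.split())]
-- ===== Notes on version B (the rewrite author's own statement) =====
-- stated objective: alternative
-- what changed: Replaces the accumulator loop that grows partial pattern strings token by token with a suffix recursion that builds token-combination lists and joins each once at the end.
import Mathlib
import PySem

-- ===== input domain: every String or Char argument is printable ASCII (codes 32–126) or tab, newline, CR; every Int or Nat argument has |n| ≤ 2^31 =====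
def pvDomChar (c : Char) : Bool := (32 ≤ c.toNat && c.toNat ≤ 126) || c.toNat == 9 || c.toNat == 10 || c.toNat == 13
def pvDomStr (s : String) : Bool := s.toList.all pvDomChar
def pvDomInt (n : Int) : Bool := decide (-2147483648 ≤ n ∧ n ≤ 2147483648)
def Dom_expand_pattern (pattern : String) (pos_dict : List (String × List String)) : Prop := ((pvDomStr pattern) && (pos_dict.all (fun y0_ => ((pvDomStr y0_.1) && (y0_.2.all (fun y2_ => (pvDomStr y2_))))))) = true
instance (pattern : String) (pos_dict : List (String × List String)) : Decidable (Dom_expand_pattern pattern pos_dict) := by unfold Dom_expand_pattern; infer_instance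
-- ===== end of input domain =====

-- ===== PORT A =====
-- A builds partial pattern strings in an accumulator loop, then strips each; B is a
-- suffix recursion over token-choice lists joined once at the end (alternative decomposition).

-- f"{p} {tag}" (kernel-transparent string concatenation)
def pvCat (p tag : String) : String := String.ofList (p.toList ++ ' ' :: tag.toList)

-- the body of A's for-loop, one token at a time
def pvStep (pos_dict : List (String × List String)) (expanded : List String) (token : String) : List String :=
  if PySem.Str.isIn ".*" token then
    let possible_tags := (PySem.Dict.mk pos_dict).getD token []
    expanded.flatMap (fun p => possible_tags.map (fun tag => pvCat p tag))
  else
    expanded.map (fun p => pvCat p token)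

def expand_pattern (pattern : String) (pos_dict : List (String × List String)) : List String :=
  let tokens := PySem.Str.split₀ pattern
  let expanded_patterns := tokens.foldl (pvStep pos_dict) [""]
  expanded_patterns.map (fun p => PySem.Str.strip p)

-- ===== PORT B =====
-- combos(tokens) of Source B: per-token choices expanded suffix-first into token lists
def pvCombos (pos_dict : List (String × List String)) : List String → List (List String)
  | [] => [[]]
  | head :: rest =>
    let options := if PySem.Str.isIn ".*" head then (PySem.Dict.mk pos_dict).getD head [] else [head]
    let tails := pvCombos pos_dict rest
    options.flatMap (fun opt => tails.map (fun tail => opt :: tail))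

def expand_pattern_alt (pattern : String) (pos_dict : List (String × List String)) : List String :=
  (pvCombos pos_dict (PySem.Str.split₀ pattern)).map
    (fun c => PySem.Str.strip (PySem.Str.join " " c))

-- ===== PRECONDITION & SPEC =====
def Spec_expand_pattern (pattern : String) (pos_dict : List (String × List String)) (out : List String) : Prop := out = expand_pattern_alt pattern pos_dict
instance (pattern : String) (pos_dict : List (String × List String)) (out : List String) : Decidable (Spec_expand_pattern pattern pos_dict out) := by unfold Spec_expand_pattern; infer_instance

-- ===== CLAIM (what is proved, stated in full; the proofs are below) =====
def Claim_equal_expand_pattern : Prop := ∀ (pattern : String) (pos_dict : List (String × List String)), Dom_expand_pattern pattern pos_dict → Spec_expand_pattern pattern pos_dict (expand_pattern pattern pos_dict)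

-- ===== LEMMAS AND PROOFS =====
lemma pvStep_eq_flatMap (pd : List (String × List String)) (E : List String) (t : String) :
    pvStep pd E t = E.flatMap (fun p =>
      (if PySem.Str.isIn ".*" t then (PySem.Dict.mk pd).getD t [] else [t]).map (fun o => pvCat p o)) := by
  unfold pvStep
  split_ifs with h <;> simp [List.map_eq_flatMap]

-- loop invariant: A's accumulator is every prefix-string extended by every suffix combination
lemma pvFoldl_step (pd : List (String × List String)) :
    ∀ (ts : List String) (E : List String),
      ts.foldl (pvStep pd) E = E.flatMap (fun p => (pvCombos pd ts).map (fun c => c.foldl pvCat p)) := by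
  intro ts
  induction ts with
  | nil => intro E; simp [pvCombos]
  | cons t rest ih =>
    intro E
    rw [List.foldl_cons, ih, pvStep_eq_flatMap]
    simp [pvCombos, List.flatMap_assoc, List.flatMap_map, List.map_flatMap, List.map_map, List.foldl_cons, Function.comp_def]

lemma pvCat_toList (p tag : String) : (pvCat p tag).toList = p.toList ++ ' ' :: tag.toList := by
  simp [pvCat, String.toList_ofList]

lemma pvFoldl_cat_toList : ∀ (c : List String) (p : String),
    (c.foldl pvCat p).toList = p.toList ++ c.flatMap (fun x => ' ' :: x.toList) := by
  intro c
  induction c with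
  | nil => intro p; simp
  | cons x cs ih => intro p; simp [ih, pvCat_toList]

lemma pvJoin_space : ∀ (ls : List (List Char)) (a : List Char),
    PySem.Chars.join [' '] (a :: ls) = a ++ ls.flatMap (fun l => ' ' :: l) := by
  intro ls
  induction ls with
  | nil => intro a; simp [PySem.Chars.join_singleton]
  | cons b ls' ih => intro a; rw [PySem.Chars.join_cons_cons, ih b]; simp

lemma pvStrip_space_cons (l : List Char) : PySem.Chars.strip (' ' :: l) = PySem.Chars.strip l := by
  simp [PySem.Chars.strip, PySem.Chars.lstrip, PySem.Chars.isspace]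

lemma pvStrip_combo (c : List String) :
    PySem.Str.strip (c.foldl pvCat "") = PySem.Str.strip (PySem.Str.join " " c) := by
  apply String.toList_inj.mp
  simp only [PySem.Str.toList_strip, pvFoldl_cat_toList, PySem.Str.toList_join]
  rw [show (" " : String).toList = [' '] from rfl]
  cases c with
  | nil => simp [PySem.Chars.join, List.intercalate]
  | cons x cs =>
    rw [List.map_cons, pvJoin_space]
    simp [List.flatMap_map, pvStrip_space_cons]

-- ===== VERDICT (by name: the statement is the Claim_ definition above) =====
theorem expand_pattern_spec : Claim_equal_expand_pattern := by
  intro pattern pos_dict _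
  unfold Spec_expand_pattern
  show (List.foldl (pvStep pos_dict) [""] (PySem.Str.split₀ pattern)).map (fun p => PySem.Str.strip p)
      = (pvCombos pos_dict (PySem.Str.split₀ pattern)).map (fun c => PySem.Str.strip (PySem.Str.join " " c))
  rw [pvFoldl_step]
  simp [pvStrip_combo]
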